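-- pv_equiv track=rewrite | github.com/jeetswadia/CodeSignal | areSimilar.py | solution
-- ===== SOURCE A (Python) =====
-- def solution(a, b):
--
--     if sorted(a) != sorted(b):
--         return False
--     elif a==b:
--         return True
--     else:
--         i=0
--         while i<len(a):
--             if a[i]==b[i]:
--                 a.pop(i)
--                 b.pop(i)
--             else:
--                 i += 1
--
--         if len(a)!=2:
--             return False
--         b.reverse()
--
--         if a==b:
--             return True
--         else:
--             return False
-- ===== SOURCE B (Python) =====
-- def solution(a, b):
--     # Single pass: collect mismatched pairs; equal, or exactly two forming a swap.
--     # (Does not mutate its arguments, unlike A, which pops from a and b in place.)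
--     if len(a) != len(b):
--         return False
--     diffs = [(x, y) for x, y in zip(a, b) if x != y]
--     if not diffs:
--         return True
--     if len(diffs) != 2:
--         return False
--     (x1, y1), (x2, y2) = diffs
--     return x1 == y2 and x2 == y1
-- ===== Notes on version B (the rewrite author's own statement) =====
-- stated objective: faster
-- what changed: Replaces sort-and-compare plus a quadratic pop-matching-positions loop with a single zip pass that collects mismatched pairs and checks they are empty or exactly two crossed values.
import Mathlib
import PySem

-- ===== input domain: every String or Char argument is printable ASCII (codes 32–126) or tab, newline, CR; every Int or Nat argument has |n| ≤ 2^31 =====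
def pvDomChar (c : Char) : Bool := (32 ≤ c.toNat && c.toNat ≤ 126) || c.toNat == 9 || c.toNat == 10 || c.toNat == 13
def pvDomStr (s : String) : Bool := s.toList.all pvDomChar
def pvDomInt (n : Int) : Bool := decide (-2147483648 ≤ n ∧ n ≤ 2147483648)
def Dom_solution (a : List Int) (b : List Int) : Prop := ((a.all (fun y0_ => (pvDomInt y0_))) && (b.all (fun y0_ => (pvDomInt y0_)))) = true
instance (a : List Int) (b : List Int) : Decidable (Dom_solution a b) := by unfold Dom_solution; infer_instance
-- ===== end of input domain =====

-- B replaces A's sort-compare plus pop-matching-positions loop by one zip pass over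
-- the two lists collecting the mismatched pairs. Equivalence is about the RETURN
-- value only: Python A mutates its arguments (pop), B does not.

-- ===== PORT A =====
-- the 'while i < len(a): if a[i]==b[i]: a.pop(i); b.pop(i) else: i += 1' loop;
-- the element comparison a[i]==b[i] is ported as getElem? equality (in every call
-- A makes, the lists have equal length, so b[i] is in range exactly like a[i])
def popLoop (a : List Int) (b : List Int) (i : Nat) : List Int × List Int :=
  if h : i < a.length then
    if a[i]? = b[i]? then popLoop (a.eraseIdx i) (b.eraseIdx i) i
    else popLoop a b (i + 1)
  else (a, b)
termination_by a.length - i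
decreasing_by
  · simp [List.length_eraseIdx, h]; omega
  · omega

def solution (a : List Int) (b : List Int) : Bool :=
  if PySem.List.sorted a (fun x => x) false ≠ PySem.List.sorted b (fun x => x) false then
    false
  else if a = b then
    true
  else
    let p := popLoop a b 0
    if p.1.length ≠ 2 then false
    else
      -- b.reverse(); a == b
      if p.1 = p.2.reverse then true else false

-- ===== PORT B =====
def solution_alt (a : List Int) (b : List Int) : Bool :=
  if a.length ≠ b.length then false
  else
    let diffs := (a.zip b).filter (fun p => p.1 != p.2)
    if diffs.isEmpty then true
    else if diffs.length ≠ 2 then false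
    else
      match diffs with
      | [(x1, y1), (x2, y2)] => x1 == y2 && x2 == y1
      | _ => false

-- ===== PRECONDITION & SPEC =====
def Spec_solution (a : List Int) (b : List Int) (out : Bool) : Prop := out = solution_alt a b
instance (a : List Int) (b : List Int) (out : Bool) : Decidable (Spec_solution a b out) := by unfold Spec_solution; infer_instance

-- ===== CLAIM (what is proved, stated in full; the proofs are below) =====
def Claim_equal_solution : Prop := ∀ (a : List Int) (b : List Int), Dom_solution a b → Spec_solution a b (solution a b)

-- ===== LEMMAS AND PROOFS =====

-- the mismatched pairs of two equal-length lists
def mism (a b : List Int) : List (Int × Int) := (a.zip b).filter (fun p => p.1 != p.2)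

lemma mism_cons (x y : Int) (xs ys : List Int) :
    mism (x :: xs) (y :: ys) = if x = y then mism xs ys else (x, y) :: mism xs ys := by
  by_cases h : x = y <;> simp [mism, h]

lemma eraseIdx_take (l : List Int) (i : Nat) : (l.eraseIdx i).take i = l.take i := by
  induction l generalizing i with
  | nil => simp
  | cons x xs ih =>
    cases i with
    | zero => simp
    | succ j => simp [List.eraseIdx, ih]

lemma eraseIdx_drop (l : List Int) (i : Nat) : (l.eraseIdx i).drop i = l.drop (i + 1) := by
  induction l generalizing i with
  | nil => simp
  | cons x xs ih =>
    cases i with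
    | zero => simp
    | succ j => simp [List.eraseIdx, ih]

lemma popLoop_spec (a b : List Int) (i : Nat) (hlen : a.length = b.length) :
    popLoop a b i = (a.take i ++ (mism (a.drop i) (b.drop i)).map Prod.fst,
                     b.take i ++ (mism (a.drop i) (b.drop i)).map Prod.snd) := by
  induction a, b, i using popLoop.induct with
  | case1 a b i h heq ih =>
    have hib : i < b.length := hlen ▸ h
    have hlen' : (a.eraseIdx i).length = (b.eraseIdx i).length := by
      simp [List.length_eraseIdx, hib, hlen]
    have hab : a[i] = b[i] := by
      have := heq
      rw [List.getElem?_eq_getElem h, List.getElem?_eq_getElem hib] at this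
      exact Option.some.inj this
    have ha : a.drop i = a[i] :: a.drop (i + 1) := List.drop_eq_getElem_cons h
    have hb : b.drop i = b[i] :: b.drop (i + 1) := List.drop_eq_getElem_cons hib
    rw [popLoop, dif_pos h, if_pos heq, ih hlen',
      eraseIdx_take a i, eraseIdx_take b i, eraseIdx_drop a i, eraseIdx_drop b i,
      ha, hb, mism_cons, if_pos hab]
  | case2 a b i h hne ih =>
    have hib : i < b.length := hlen ▸ h
    have hab : a[i] ≠ b[i] := by
      intro e
      exact hne (by rw [List.getElem?_eq_getElem h, List.getElem?_eq_getElem hib, e])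
    have ha : a.drop i = a[i] :: a.drop (i + 1) := List.drop_eq_getElem_cons h
    have hb : b.drop i = b[i] :: b.drop (i + 1) := List.drop_eq_getElem_cons hib
    rw [popLoop, dif_pos h, if_neg hne, ih hlen]
    conv_rhs => rw [ha, hb, mism_cons, if_neg hab]
    rw [List.take_add_one, List.take_add_one, List.getElem?_eq_getElem h,
      List.getElem?_eq_getElem hib]
    simp only [Option.toList_some, List.append_assoc, List.singleton_append,
      List.map_cons]
  | case3 a b i h =>
    have hia : a.length ≤ i := Nat.le_of_not_lt h
    have hib : b.length ≤ i := hlen ▸ hia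
    rw [popLoop, dif_neg h]
    simp [List.take_of_length_le hia, List.take_of_length_le hib,
      List.drop_of_length_le hia, List.drop_of_length_le hib, mism]

lemma mism_self (a : List Int) : mism a a = [] := by
  induction a with
  | nil => rfl
  | cons x xs ih => simpa [mism_cons] using ih

-- equal-length lists with no mismatched pair are equal
lemma eq_of_mism_nil (a b : List Int) (hlen : a.length = b.length)
    (h : mism a b = []) : a = b := by
  induction a generalizing b with
  | nil =>
    cases b with
    | nil => rfl
    | cons y ys => simp at hlen
  | cons x xs ih =>
    cases b with
    | nil => simp at hlen
    | cons y ys =>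
      have hxy : x = y := by
        by_contra hxy
        simp [mism_cons, hxy] at h
      subst hxy
      have h' : mism xs ys = [] := by simpa [mism_cons] using h
      rw [ih ys (by simpa using hlen) h']

-- map fst of the matched pairs equals map snd
lemma matched_fst_eq_snd (l : List (Int × Int)) :
    (l.filter (fun p => !(p.1 != p.2))).map Prod.fst
      = (l.filter (fun p => !(p.1 != p.2))).map Prod.snd := by
  induction l with
  | nil => rfl
  | cons p l ih =>
    by_cases h : p.1 = p.2
    · simp [h, ih]
    · simp [h, ih]

-- if the mismatched firsts are a permutation of the mismatched seconds, then a ~ b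
lemma perm_of_mism_perm (a b : List Int) (hlen : a.length = b.length)
    (h : ((mism a b).map Prod.fst).Perm ((mism a b).map Prod.snd)) : a.Perm b := by
  have hza : (a.zip b).map Prod.fst = a := List.map_fst_zip (le_of_eq hlen)
  have hzb : (a.zip b).map Prod.snd = b := List.map_snd_zip (ge_of_eq hlen)
  have hsplit : ((a.zip b).filter (fun p => p.1 != p.2)
        ++ (a.zip b).filter (fun p => !(p.1 != p.2))).Perm (a.zip b) :=
    List.filter_append_perm _ _
  have ha := hsplit.map Prod.fst
  have hb := hsplit.map Prod.snd
  rw [List.map_append, hza] at ha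
  rw [List.map_append, hzb] at hb
  refine ha.symm.trans (.trans ?_ hb)
  have h' : ((List.filter (fun p => p.1 != p.2) (a.zip b)).map Prod.fst).Perm
      ((List.filter (fun p => p.1 != p.2) (a.zip b)).map Prod.snd) := h
  have hmt := matched_fst_eq_snd (a.zip b)
  rw [hmt]
  exact h'.append_right _

-- ===== VERDICT (by name: the statement is the Claim_ definition above) =====
theorem solution_spec : Claim_equal_solution := by
  intro a b _
  unfold Spec_solution
  by_cases hs : PySem.List.sorted a (fun x => x) false = PySem.List.sorted b (fun x => x) false
  · -- multisets equal: a ~ b, hence equal lengths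
    have hperm : a.Perm b := (PySem.List.sorted_id_eq_sorted_id_iff_perm a b).mp hs
    have hlen : a.length = b.length := hperm.length_eq
    by_cases hab : a = b
    · subst hab
      have h0 : List.filter (fun p => p.1 != p.2) (a.zip a) = [] := mism_self a
      simp [solution, solution_alt, h0]
    · have hp := popLoop_spec a b 0 hlen
      simp only [List.take_zero, List.drop_zero, List.nil_append] at hp
      have hne : mism a b ≠ [] := fun h => hab (eq_of_mism_nil a b hlen h)
      rcases hm : mism a b with _ | ⟨⟨x1, y1⟩, _ | ⟨⟨x2, y2⟩, _ | ⟨q, rest⟩⟩⟩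
      · exact absurd hm hne
      · -- exactly one mismatch: both sides false
        have hm' : List.filter (fun p => p.1 != p.2) (a.zip b) = [(x1, y1)] := hm
        rw [hm] at hp
        simp [solution, solution_alt, hs, hab, hlen, hp, hm']
      · -- exactly two mismatches
        have hm' : List.filter (fun p => p.1 != p.2) (a.zip b) = [(x1, y1), (x2, y2)] := hm
        rw [hm] at hp
        simp only [List.map_cons, List.map_nil] at hp
        by_cases h1 : x1 = y2
        · by_cases h2 : x2 = y1
          · simp [solution, solution_alt, hs, hab, hlen, hp, hm', h1, h2]
          · simp [solution, solution_alt, hs, hab, hlen, hp, hm', h1, h2]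
        · simp [solution, solution_alt, hs, hab, hlen, hp, hm', h1]
      · -- three or more mismatches: both sides false
        have hm' : List.filter (fun p => p.1 != p.2) (a.zip b)
            = (x1, y1) :: (x2, y2) :: q :: rest := hm
        rw [hm] at hp
        simp [solution, solution_alt, hs, hab, hlen, hp, hm']
  · -- sorted lists differ: not a permutation; A = false, and B must be false too
    have hnperm : ¬ a.Perm b := fun h => hs ((PySem.List.sorted_id_eq_sorted_id_iff_perm a b).mpr h)
    have hA : solution a b = false := by simp [solution, hs]
    rw [hA]
    by_cases hlen : a.length = b.length
    · rcases hm : mism a b with _ | ⟨⟨x1, y1⟩, _ | ⟨⟨x2, y2⟩, rest⟩⟩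
      · exact absurd (eq_of_mism_nil a b hlen hm ▸ List.Perm.refl a) hnperm
      · have hm' : List.filter (fun p => p.1 != p.2) (a.zip b) = [(x1, y1)] := hm
        simp [solution_alt, hlen, hm']
      · cases rest with
        | nil =>
          have hm' : List.filter (fun p => p.1 != p.2) (a.zip b) = [(x1, y1), (x2, y2)] := hm
          have hkey : ¬ (x1 = y2 ∧ x2 = y1) := by
            rintro ⟨h1, h2⟩
            apply hnperm
            apply perm_of_mism_perm a b hlen
            rw [hm]
            simp only [List.map_cons, List.map_nil, h1, h2]
            exact List.Perm.swap y1 y2 []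
          simp only [solution_alt, hlen, ne_eq, not_true_eq_false, if_false, hm']
          simp only [List.isEmpty_cons, Bool.false_eq_true, if_false, List.length_cons,
            List.length_nil]
          rw [if_neg (by simp)]
          have hval : (x1 == y2 && x2 == y1) = false := by
            by_contra hc
            simp only [Bool.not_eq_false, Bool.and_eq_true, beq_iff_eq] at hc
            exact hkey hc
          simp [hval]
        | cons q rest =>
          have hm' : List.filter (fun p => p.1 != p.2) (a.zip b)
              = (x1, y1) :: (x2, y2) :: q :: rest := hm
          simp [solution_alt, hlen, hm']
    · simp [solution_alt, hlen]
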